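-- pv_equiv track=rewrite | github.com/Ascetics/ctfkit | crypto/ctf_rot.py | rot18enc
-- ===== SOURCE A (Python) =====
-- def rot5enc(string):
--     result = ''
--     for c in string:
--         if ord('0') <= ord(c) <= ord('9'):
--             result += chr(ord('0') + (ord(c) - ord('0') + 5) % 10)
--         else:
--             result += c
--     return result
--
-- def rot13enc(string):
--     result = ''
--     for c in string:
--         if ord('A') <= ord(c) <= ord('Z'):
--             result += chr(ord('A') + (ord(c) - ord('A') + 13) % 26)
--         elif ord('a') <= ord(c) <= ord('z'):
--             result += chr(ord('a') + (ord(c) - ord('a') + 13) % 26)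
--         else:
--             result += c
--     return result
--
-- def rot18enc(string):
--     result = ''
--     for c in string:
--         if ord('0') <= ord(c) <= ord('9'):
--             result += rot5enc(c)
--         elif ord('A') <= ord(c) <= ord('Z') or ord('a') <= ord(c) <= ord('z'):
--             result += rot13enc(c)
--         else:
--             result += c
--     return result
-- ===== SOURCE B (Python) =====
-- def rot18enc(string):
--     src = '0123456789ABCDEFGHIJKLMNOPQRSTUVWXYZabcdefghijklmnopqrstuvwxyz'
--     dst = '5678901234NOPQRSTUVWXYZABCDEFGHIJKLMnopqrstuvwxyzabcdefghijklm'
--     return string.translate(str.maketrans(src, dst))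
-- ===== Notes on version B (the rewrite author's own statement) =====
-- stated objective: idiomatic
-- what changed: B precomputes the whole ROT18 mapping as one literal translation table and does a single str.translate pass, instead of A's per-character range tests that re-call the rot5/rot13 helper loops on one-character strings.
import Mathlib
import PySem

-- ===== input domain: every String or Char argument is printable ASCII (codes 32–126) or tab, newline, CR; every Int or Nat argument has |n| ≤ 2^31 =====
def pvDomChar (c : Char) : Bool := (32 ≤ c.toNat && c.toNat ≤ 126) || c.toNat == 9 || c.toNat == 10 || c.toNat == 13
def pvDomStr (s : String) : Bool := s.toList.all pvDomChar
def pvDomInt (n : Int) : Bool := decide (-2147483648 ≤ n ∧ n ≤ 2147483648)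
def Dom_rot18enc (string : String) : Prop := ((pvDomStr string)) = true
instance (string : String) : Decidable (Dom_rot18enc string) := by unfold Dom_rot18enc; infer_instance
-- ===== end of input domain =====

-- B builds the full ROT18 mapping once as a literal translation table and translates in one
-- pass (idiomatic), instead of A's per-character range tests calling rot5/rot13 helper loops.

set_option maxRecDepth 8192


-- ===== PORT A =====
def pvRot5enc (string : String) : String :=
  String.ofList (string.toList.foldl (fun result c =>
    if 48 ≤ c.toNat ∧ c.toNat ≤ 57 then
      result ++ [Char.ofNat (48 + (c.toNat - 48 + 5) % 10)]
    else
      result ++ [c]) [])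

def pvRot13enc (string : String) : String :=
  String.ofList (string.toList.foldl (fun result c =>
    if 65 ≤ c.toNat ∧ c.toNat ≤ 90 then
      result ++ [Char.ofNat (65 + (c.toNat - 65 + 13) % 26)]
    else if 97 ≤ c.toNat ∧ c.toNat ≤ 122 then
      result ++ [Char.ofNat (97 + (c.toNat - 97 + 13) % 26)]
    else
      result ++ [c]) [])

def rot18enc (string : String) : String :=
  String.ofList (string.toList.foldl (fun result c =>
    if 48 ≤ c.toNat ∧ c.toNat ≤ 57 then
      result ++ (pvRot5enc (String.ofList [c])).toList
    else if (65 ≤ c.toNat ∧ c.toNat ≤ 90) ∨ (97 ≤ c.toNat ∧ c.toNat ≤ 122) then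
      result ++ (pvRot13enc (String.ofList [c])).toList
    else
      result ++ [c]) [])

-- ===== PORT B =====
-- str.maketrans(src, dst) keys codepoints; ported as a Char → Char dict, exact here since
-- translate substitutes per character.
def rot18enc_alt (string : String) : String :=
  let src := "0123456789ABCDEFGHIJKLMNOPQRSTUVWXYZabcdefghijklmnopqrstuvwxyz"
  let dst := "5678901234NOPQRSTUVWXYZABCDEFGHIJKLMnopqrstuvwxyzabcdefghijklm"
  let table : PySem.Dict Char Char := PySem.Dict.ofList (src.toList.zip dst.toList)
  String.ofList (string.toList.map (fun c => table.getD c c))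

-- ===== PRECONDITION & SPEC =====
def Spec_rot18enc (string : String) (out : String) : Prop := out = rot18enc_alt string
instance (string : String) (out : String) : Decidable (Spec_rot18enc string out) := by unfold Spec_rot18enc; infer_instance

-- ===== CLAIM (what is proved, stated in full; the proofs are below) =====
def Claim_equal_rot18enc : Prop := ∀ (string : String), Dom_rot18enc string → Spec_rot18enc string (rot18enc string)

-- ===== LEMMAS AND PROOFS =====
-- What one step of A's loop appends for character c.
def pvStepA (c : Char) : List Char :=
  if 48 ≤ c.toNat ∧ c.toNat ≤ 57 then
    (pvRot5enc (String.ofList [c])).toList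
  else if (65 ≤ c.toNat ∧ c.toNat ≤ 90) ∨ (97 ≤ c.toNat ∧ c.toNat ≤ 122) then
    (pvRot13enc (String.ofList [c])).toList
  else
    [c]

-- B's per-character table lookup.
def pvStepB (c : Char) : Char :=
  (PySem.Dict.ofList
    ("0123456789ABCDEFGHIJKLMNOPQRSTUVWXYZabcdefghijklmnopqrstuvwxyz".toList.zip
     "5678901234NOPQRSTUVWXYZABCDEFGHIJKLMnopqrstuvwxyzabcdefghijklm".toList)).getD c c

theorem pvA_eq_flatMap (s : String) :
    rot18enc s = String.ofList (s.toList.flatMap pvStepA) := by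
  unfold rot18enc
  rw [show (fun (result : List Char) (c : Char) =>
        if 48 ≤ c.toNat ∧ c.toNat ≤ 57 then
          result ++ (pvRot5enc (String.ofList [c])).toList
        else if (65 ≤ c.toNat ∧ c.toNat ≤ 90) ∨ (97 ≤ c.toNat ∧ c.toNat ≤ 122) then
          result ++ (pvRot13enc (String.ofList [c])).toList
        else
          result ++ [c]) = (fun result c => result ++ pvStepA c) by
        funext result c; unfold pvStepA; split_ifs <;> rfl]
  rw [PySem.List.foldl_append_eq_flatMap]
  rfl

theorem pvB_eq_map (s : String) :
    rot18enc_alt s = String.ofList (s.toList.map pvStepB) := rfl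

theorem pvStep_eq (c : Char) (h : pvDomChar c = true) : pvStepA c = [pvStepB c] := by
  have hc : Char.ofNat c.toNat = c := Char.ofNat_toNat c
  have hb : (32 ≤ c.toNat ∧ c.toNat ≤ 126) ∨ c.toNat = 9 ∨ c.toNat = 10 ∨ c.toNat = 13 := by
    simp [pvDomChar] at h; omega
  rcases hb with ⟨h1, h2⟩ | h9 | h10 | h13
  · set n := c.toNat with hn
    rw [← hc]
    interval_cases n <;> decide
  · rw [← hc, h9]; decide
  · rw [← hc, h10]; decide
  · rw [← hc, h13]; decide

theorem pvFlatMap_eq_map (l : List Char) (h : ∀ c ∈ l, pvDomChar c = true) :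
    l.flatMap pvStepA = l.map pvStepB := by
  induction l with
  | nil => rfl
  | cons c t ih =>
    simp only [List.flatMap_cons, List.map_cons]
    rw [pvStep_eq c (h c (List.mem_cons_self)), ih (fun x hx => h x (List.mem_cons_of_mem _ hx))]
    rfl

-- ===== VERDICT (by name: the statement is the Claim_ definition above) =====
theorem rot18enc_spec : Claim_equal_rot18enc := by
  intro s hdom
  unfold Spec_rot18enc
  have hall : ∀ c ∈ s.toList, pvDomChar c = true := by
    simpa [Dom_rot18enc, pvDomStr, List.all_eq_true] using hdom
  rw [pvA_eq_flatMap, pvB_eq_map, pvFlatMap_eq_map _ hall]
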